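-- pv_equiv track=rewrite | github.com/zhengmark/searchways | web/server.py | _find_poi
-- ===== SOURCE A (Python) =====
-- def _find_poi(name: str, pois: list) -> dict:
--     """从 POI 列表中按名称查找."""
--     if not pois:
--         return {}
--     for p in pois:
--         if p.get("name") == name:
--             return p
--     for p in pois:
--         if name in p.get("name", "") or p.get("name", "") in name:
--             return p
--     return {}
-- ===== SOURCE B (Python) =====
-- def _find_poi(name: str, pois: list) -> dict:
--     """Single pass: exact match returns immediately; first fuzzy match is remembered."""
--     cand = None
--     for p in pois:
--         if p.get("name") == name:
--             return p
--         if cand is None: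
--             s = p.get("name", "")
--             if name in s or s in name:
--                 cand = p
--     return cand if cand is not None else {}
-- ===== Notes on version B (the rewrite author's own statement) =====
-- stated objective: alternative
-- what changed: Collapses A's two sequential scans (exact scan then substring scan) into one loop that returns on an exact match and remembers the first fuzzy candidate.
import Mathlib
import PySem

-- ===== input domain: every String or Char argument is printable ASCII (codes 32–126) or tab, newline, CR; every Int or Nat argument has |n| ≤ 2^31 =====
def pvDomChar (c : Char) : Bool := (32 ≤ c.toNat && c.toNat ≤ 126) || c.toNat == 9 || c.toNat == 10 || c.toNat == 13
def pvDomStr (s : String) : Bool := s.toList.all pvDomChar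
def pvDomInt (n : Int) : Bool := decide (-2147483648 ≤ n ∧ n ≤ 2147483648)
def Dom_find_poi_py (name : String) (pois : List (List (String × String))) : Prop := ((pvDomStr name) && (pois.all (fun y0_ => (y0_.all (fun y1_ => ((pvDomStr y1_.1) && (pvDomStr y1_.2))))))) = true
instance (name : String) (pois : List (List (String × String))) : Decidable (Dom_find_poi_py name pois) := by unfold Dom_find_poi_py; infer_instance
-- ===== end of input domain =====

-- B replaces A's two sequential scans by one single pass that remembers the first fuzzy match (same cost, different decomposition).

-- ===== PORT A =====
-- first loop: 'for p in pois: if p.get("name") == name: return p'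
def pvExactScan (name : String) : List (List (String × String)) → Option (List (String × String))
  | [] => none
  | p :: rest => if p.lookup "name" = some name then some p else pvExactScan name rest

-- second loop: 'for p in pois: if name in p.get("name","") or p.get("name","") in name: return p'
def pvFuzzyScan (name : String) : List (List (String × String)) → Option (List (String × String))
  | [] => none
  | p :: rest =>
    if PySem.Str.isIn name ((p.lookup "name").getD "") || PySem.Str.isIn ((p.lookup "name").getD "") name
    then some p else pvFuzzyScan name rest

def find_poi_py (name : String) (pois : List (List (String × String))) : List (String × String) :=
  if pois = [] then []
  else
    match pvExactScan name pois with
    | some p => p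
    | none =>
      match pvFuzzyScan name pois with
      | some p => p
      | none => []

-- ===== PORT B =====
-- one loop with a remembered first-fuzzy candidate
def pvScanB (name : String) (cand : Option (List (String × String))) :
    List (List (String × String)) → List (String × String)
  | [] => cand.getD []
  | p :: rest =>
    if p.lookup "name" = some name then p
    else
      pvScanB name
        (if cand.isNone &&
            (PySem.Str.isIn name ((p.lookup "name").getD "") ||
             PySem.Str.isIn ((p.lookup "name").getD "") name)
         then some p else cand) rest

def find_poi_py_alt (name : String) (pois : List (List (String × String))) : List (String × String) :=
  pvScanB name none pois

-- ===== PRECONDITION & SPEC =====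
def Spec_find_poi_py (name : String) (pois : List (List (String × String))) (out : List (String × String)) : Prop := out = find_poi_py_alt name pois
instance (name : String) (pois : List (List (String × String))) (out : List (String × String)) : Decidable (Spec_find_poi_py name pois out) := by unfold Spec_find_poi_py; infer_instance

-- ===== CLAIM (what is proved, stated in full; the proofs are below) =====
def Claim_equal_find_poi_py : Prop := ∀ (name : String) (pois : List (List (String × String))), Dom_find_poi_py name pois → Spec_find_poi_py name pois (find_poi_py name pois)

-- ===== LEMMAS AND PROOFS =====
theorem pvScanB_eq (name : String) (pois : List (List (String × String)))
    (cand : Option (List (String × String))) :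
    pvScanB name cand pois =
      (match pvExactScan name pois with
       | some p => p
       | none => ((cand.orElse (fun _ => pvFuzzyScan name pois)).getD [])) := by
  induction pois generalizing cand with
  | nil => cases cand <;> simp [pvScanB, pvExactScan, pvFuzzyScan]
  | cons p rest ih =>
    by_cases hex : p.lookup "name" = some name
    · simp [pvScanB, pvExactScan, hex]
    · simp only [pvScanB, pvExactScan, pvFuzzyScan, if_neg hex, ih]
      cases cand <;> simp <;>
        cases pvExactScan name rest <;> simp <;> split_ifs <;> simp

-- ===== VERDICT (by name: the statement is the Claim_ definition above) =====
theorem find_poi_py_spec : Claim_equal_find_poi_py := by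
  intro name pois _
  show find_poi_py name pois = find_poi_py_alt name pois
  unfold find_poi_py find_poi_py_alt
  rw [pvScanB_eq]
  cases pois with
  | nil => simp [pvExactScan, pvFuzzyScan]
  | cons p rest =>
    simp only [Option.orElse, reduceCtorEq]
    cases pvExactScan name (p :: rest) <;> cases pvFuzzyScan name (p :: rest) <;> simp
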